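-- pv_equiv track=rewrite | github.com/reginaib/Programming | Series_09/wandelende_vingers.py | issubword
-- ===== SOURCE A (Python) =====
-- def issubword(word1, word2):
--     word2_iter = iter(word2)
--
--     previous = None
--     for char1 in word1:
--         if char1 == previous:
--             continue
--         previous = char1
--
--         for char2 in word2_iter:
--             if char1 == char2:
--                 break
--         else:
--             return False
--     return True
-- ===== SOURCE B (Python) =====
-- def issubword(word1, word2):
--     # Transposed traversal: one pass over word2, keeping only an index into
--     # word1; each character of word2 consumes the whole run of equal
--     # characters of word1 standing at the index (zero if it doesn't match).
--     i, n = 0, len(word1)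
--     for ch in word2:
--         while i < n and word1[i] == ch:
--             i += 1
--     return i == n
-- ===== Notes on version B (the rewrite author's own statement) =====
-- stated objective: alternative
-- what changed: A loops over word1 with a previous-char dedup state and an inner for/else scan of a shared word2 iterator; B transposes the traversal: a single pass over word2 keeping only an integer index into word1, where each word2 character consumes the whole run of equal word1 characters at the index, finishing with an index-at-end check.
import Mathlib
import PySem

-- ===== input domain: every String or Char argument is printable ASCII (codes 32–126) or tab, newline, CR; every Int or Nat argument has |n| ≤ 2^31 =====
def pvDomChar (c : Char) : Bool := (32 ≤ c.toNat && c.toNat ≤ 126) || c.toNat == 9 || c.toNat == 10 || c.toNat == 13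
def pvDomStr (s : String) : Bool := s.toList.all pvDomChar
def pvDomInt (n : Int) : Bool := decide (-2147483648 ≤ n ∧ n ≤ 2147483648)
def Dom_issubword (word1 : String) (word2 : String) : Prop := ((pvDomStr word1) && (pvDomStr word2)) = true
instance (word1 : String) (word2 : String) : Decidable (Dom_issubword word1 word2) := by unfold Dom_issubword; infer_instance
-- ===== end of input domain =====

-- B transposes the traversal (one pass over word2 with an index into word1, consuming runs) instead of A's word1 loop with a dedup state and a shared-iterator inner scan; same cost.

-- ===== PORT A =====
-- inner 'for char2 in word2_iter: if char1 == char2: break / else: return False':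
-- returns the iterator's remaining suffix after the match, none = the else-branch (exhausted)
def pvScanA (c : Char) : List Char → Option (List Char)
  | [] => none
  | d :: ds => if c == d then some ds else pvScanA c ds

-- outer loop over word1 with the 'previous' variable and the live word2 iterator
def pvLoopA : Option Char → List Char → List Char → Bool
  | _, [], _ => true
  | prev, c :: cs, w =>
    if (some c == prev) then pvLoopA prev cs w
    else
      match pvScanA c w with
      | none => false
      | some rest => pvLoopA (some c) cs rest

def issubword (word1 : String) (word2 : String) : Bool :=
  pvLoopA none word1.toList word2.toList

-- ===== PORT B =====
-- 'while i < n and word1[i] == ch: i += 1' (word1[i] with 0 ≤ i < n: l[i]? is exact there)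
def pvSkipB (l : List Char) (ch : Char) (i : Nat) : Nat :=
  if h : i < l.length ∧ l[i]? = some ch then pvSkipB l ch (i + 1) else i
termination_by l.length - i
decreasing_by omega

-- 'for ch in word2: …' then 'return i == n'
def issubword_alt (word1 : String) (word2 : String) : Bool :=
  decide (word2.toList.foldl (fun i ch => pvSkipB word1.toList ch i) 0 = word1.toList.length)

-- ===== PRECONDITION & SPEC =====
def Spec_issubword (word1 : String) (word2 : String) (out : Bool) : Prop := out = issubword_alt word1 word2
instance (word1 : String) (word2 : String) (out : Bool) : Decidable (Spec_issubword word1 word2 out) := by unfold Spec_issubword; infer_instance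

-- ===== CLAIM (what is proved, stated in full; the proofs are below) =====
def Claim_equal_issubword : Prop := ∀ (word1 : String) (word2 : String), Dom_issubword word1 word2 → Spec_issubword word1 word2 (issubword word1 word2)

-- ===== LEMMAS AND PROOFS =====

-- common middle form: greedy subsequence test
def pvSub : List Char → List Char → Bool
  | [], _ => true
  | _ :: _, [] => false
  | c :: cs, e :: es => if c == e then pvSub cs es else pvSub (c :: cs) es

-- A's dedup behaviour as a recursion with the 'previous' state
def pvDedupP : Option Char → List Char → List Char
  | _, [] => []
  | prev, c :: cs => if (some c == prev) then pvDedupP prev cs else c :: pvDedupP (some c) cs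

-- A's loop with the dedup factored out
def pvMatch : List Char → List Char → Bool
  | [], _ => true
  | c :: cs, w =>
    match pvScanA c w with
    | none => false
    | some rest => pvMatch cs rest

theorem pvLoopA_eq_match (l : List Char) : ∀ prev w, pvLoopA prev l w = pvMatch (pvDedupP prev l) w := by
  induction l with
  | nil => intro prev w; rfl
  | cons c cs ih =>
    intro prev w
    by_cases h : (some c == prev) = true
    · simp [pvLoopA, pvDedupP, h, ih]
    · simp only [pvLoopA, pvDedupP, h, Bool.false_eq_true, not_false_eq_true, if_neg]
      cases hs : pvScanA c w with
      | none => simp [pvMatch, hs]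
      | some rest => simp [pvMatch, hs, ih]

theorem pvMatch_eq_sub (w : List Char) : ∀ d, pvMatch d w = pvSub d w := by
  induction w with
  | nil =>
    intro d
    cases d with
    | nil => rfl
    | cons c cs => simp [pvMatch, pvScanA, pvSub]
  | cons e es ih =>
    intro d
    cases d with
    | nil => rfl
    | cons c cs =>
      by_cases h : (c == e) = true
      · simp [pvMatch, pvScanA, pvSub, h, ih]
      · have : pvMatch (c :: cs) (e :: es) = pvMatch (c :: cs) es := by
          simp [pvMatch, pvScanA, h]
        rw [this, ih, pvSub]
        simp [h]

theorem pvDedupP_some (cs : List Char) : ∀ p : Char,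
    pvDedupP (some p) cs = pvDedupP none (cs.dropWhile (· == p)) := by
  induction cs with
  | nil => intro p; rfl
  | cons d ds ih =>
    intro p
    by_cases h : (d == p) = true
    · simp [pvDedupP, List.dropWhile, h, ih, show (some d == some p) = true by simpa using h]
    · simp [pvDedupP, List.dropWhile, h, show (some d == some p) = false by simpa using h]

-- B's fold, lifted from the index to the remaining suffix of word1
theorem pvSkipB_drop (l : List Char) (ch : Char) : ∀ i, i ≤ l.length →
    pvSkipB l ch i ≤ l.length ∧
      List.drop (pvSkipB l ch i) l = (List.drop i l).dropWhile (· == ch) := by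
  intro i
  induction i using pvSkipB.induct l ch with
  | case1 i h ih =>
    intro _
    have hlt : i < l.length := h.1
    have hget : l[i]'hlt = ch := by
      have := h.2; simp [List.getElem?_eq_getElem hlt] at this; exact this
    rw [pvSkipB, dif_pos h]
    have hdrop : List.drop i l = l[i]'hlt :: List.drop (i + 1) l :=
      List.drop_eq_getElem_cons hlt
    have := ih (by omega)
    refine ⟨this.1, ?_⟩
    rw [this.2, hdrop, List.dropWhile_cons]
    simp [hget]
  | case2 i h =>
    intro hle
    rw [pvSkipB, dif_neg h]
    refine ⟨hle, ?_⟩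
    by_cases hlt : i < l.length
    · have hne' : ¬ l[i]? = some ch := fun hc => h ⟨hlt, hc⟩
      have hne : (l[i]'hlt == ch) = false := by
        simp [List.getElem?_eq_getElem hlt] at hne'
        simpa using hne'
      rw [List.drop_eq_getElem_cons hlt, List.dropWhile_cons, hne]
      simp
    · have : List.drop i l = [] := List.drop_eq_nil_of_le (by omega)
      simp [this]

theorem pvFoldB_drop (l : List Char) (w : List Char) : ∀ i, i ≤ l.length →
    (w.foldl (fun i ch => pvSkipB l ch i) i) ≤ l.length ∧
      List.drop (w.foldl (fun i ch => pvSkipB l ch i) i) l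
        = w.foldl (fun r ch => r.dropWhile (· == ch)) (List.drop i l) := by
  induction w with
  | nil => intro i h; exact ⟨h, rfl⟩
  | cons ch ws ih =>
    intro i h
    have h1 := pvSkipB_drop l ch i h
    have h2 := ih (pvSkipB l ch i) h1.1
    simp only [List.foldl_cons]
    exact ⟨h2.1, by rw [h2.2, h1.2]⟩

-- the suffix-fold equals the greedy subsequence test of the dedup
theorem foldDW_eq_sub (w : List Char) : ∀ rest : List Char,
    (w.foldl (fun r ch => r.dropWhile (· == ch)) rest).isEmpty
      = pvSub (pvDedupP none rest) w := by
  induction w with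
  | nil =>
    intro rest
    cases rest with
    | nil => rfl
    | cons r rs => simp [pvDedupP, pvSub]
  | cons ch ws ih =>
    intro rest
    simp only [List.foldl_cons]
    rw [ih]
    cases rest with
    | nil => simp [List.dropWhile, pvDedupP, pvSub]
    | cons r rs =>
      by_cases h : (r == ch) = true
      · have he : (r : Char) = ch := by simpa using h
        simp [pvDedupP, pvSub, List.dropWhile, pvDedupP_some, he]
      · simp [pvDedupP, pvSub, List.dropWhile, h]

-- ===== VERDICT (by name: the statement is the Claim_ definition above) =====
theorem issubword_spec : Claim_equal_issubword := by
  intro word1 word2 _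
  show issubword word1 word2 = issubword_alt word1 word2
  unfold issubword issubword_alt
  rw [pvLoopA_eq_match, pvMatch_eq_sub, ← foldDW_eq_sub]
  obtain ⟨hle, hdrop⟩ := pvFoldB_drop word1.toList word2.toList 0 (Nat.zero_le _)
  rw [List.drop_zero] at hdrop
  rw [← hdrop]
  have hiff : (List.drop (List.foldl (fun i ch => pvSkipB word1.toList ch i) 0 word2.toList) word1.toList = [])
      ↔ (List.foldl (fun i ch => pvSkipB word1.toList ch i) 0 word2.toList = word1.toList.length) := by
    rw [List.drop_eq_nil_iff]
    omega
  rw [String.length_toList] at hiff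
  rw [Bool.eq_iff_iff, List.isEmpty_iff, decide_eq_true_iff]
  exact hiff
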